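-- pv_equiv track=rewrite | github.com/tarunganesh2004/Leetcode | LC Mothly/2025/May/16th_may.py | getLngestSubsequence
-- ===== SOURCE A (Python) =====
-- def getLngestSubsequence(words,groups):
--     def differbyOne(w1,w2):
--         if len(w1)!=len(w2):
--             return False
--
--         diff=0
--         for c1,c2 in zip(w1,w2):
--             if c1!=c2:
--                 diff+=1
--         return diff==1
--
--     n=len(groups)
--     dp=[1]*n
--     parent=[-1]*n
--     max_len=0
--     for i in range(n):
--         for j in range(i):
--             if groups[i]!=groups[j] and differbyOne(words[i],words[j]) and dp[i]<dp[j]+1: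
--                 dp[i]=dp[j]+1
--                 parent[i]=j
--
--         if dp[i]>max_len:
--             max_len=dp[i]
--
--     res=[]
--     for i in range(n):
--         if dp[i]==max_len:
--             while i!=-1:
--                 res.append(words[i])
--                 i=parent[i]
--             break
--
--     return res[::-1]
-- ===== SOURCE B (Python) =====
-- def getLngestSubsequence(words, groups):
--     # Wildcard-pattern bucketing: only true Hamming-1 neighbours are ever examined.
--     n = len(groups)
--     dp = [1] * n
--     parent = [-1] * n
--     buckets = {}
--     for i in range(n):
--         w = words[i]
--         best_d, best_j = 1, -1
--         for p in range(len(w)):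
--             for j in buckets.get((p, w[:p], w[p + 1:]), ()):
--                 if words[j][p] != w[p] and groups[j] != groups[i]:
--                     cand = dp[j] + 1
--                     if cand > best_d or (cand == best_d and j < best_j):
--                         best_d, best_j = cand, j
--         dp[i] = best_d
--         parent[i] = best_j
--         for p in range(len(w)):
--             buckets.setdefault((p, w[:p], w[p + 1:]), []).append(i)
--     max_len = 0
--     for v in dp:
--         if v > max_len:
--             max_len = v
--     k = next((k for k in range(n) if dp[k] == max_len), -1)
--     out = []
--     while k != -1:
--         out = [words[k]] + out
--         k = parent[k]
--     return out
-- ===== Notes on version B (the rewrite author's own statement) =====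
-- stated objective: faster
-- what changed: Instead of testing every earlier index with an O(L) Hamming comparison (O(n^2 L)), B buckets each word under its L wildcard patterns in a dict, so the DP over indices only ever visits true Hamming-1 neighbours (O(n L^2 + E)); the path is rebuilt by prepending instead of append-then-reverse.
-- outside the precondition, e.g. on getLngestSubsequence(['', 'ab'], [-1, -1, -1]): A returns [''], B raises IndexError
import Mathlib
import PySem

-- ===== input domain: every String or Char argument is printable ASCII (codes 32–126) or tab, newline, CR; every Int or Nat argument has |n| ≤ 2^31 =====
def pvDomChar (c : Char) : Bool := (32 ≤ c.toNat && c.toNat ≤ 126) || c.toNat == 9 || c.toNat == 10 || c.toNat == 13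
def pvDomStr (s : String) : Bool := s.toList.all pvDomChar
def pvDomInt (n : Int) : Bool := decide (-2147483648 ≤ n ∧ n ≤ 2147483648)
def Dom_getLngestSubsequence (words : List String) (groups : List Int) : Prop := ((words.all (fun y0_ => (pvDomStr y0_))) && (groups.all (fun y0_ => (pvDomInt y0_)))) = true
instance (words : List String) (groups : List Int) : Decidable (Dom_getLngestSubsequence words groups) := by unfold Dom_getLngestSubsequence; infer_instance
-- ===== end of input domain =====

-- B replaces A's all-pairs O(L) Hamming tests with wildcard-pattern buckets so the DP only
-- visits true Hamming-1 neighbours (measurably faster), and rebuilds the path by prepending.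

-- ===== PORT A =====
-- helper 'differbyOne' of A
def pvDifferByOne (w1 w2 : String) : Bool :=
  if w1.toList.length ≠ w2.toList.length then false
  else
    ((w1.toList.zip w2.toList).foldl
      (fun diff c => if c.1 ≠ c.2 then diff + 1 else diff) (0 : Int)) == 1

-- A's reconstruction while-loop ('res.append(words[i]); i = parent[i]'); fuel bounds the chain
def pvChaseA (parent : List Int) (words : List String) : Nat → Int → List String → List String
  | 0, _, res => res
  | fuel+1, i, res =>
    if i = -1 then res
    else pvChaseA parent words fuel (parent.getD i.toNat (-1)) (res ++ [words.getD i.toNat ""])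

-- body of A's 'for i in range(n)' loop; state = (dp, parent, max_len)
def pvStepA (words : List String) (groups : List Int)
    (st : List Int × List Int × Int) (i : Nat) : List Int × List Int × Int :=
  let dp := st.1
  let inner := (List.range i).foldl
    (fun (s : Int × Int) j =>
      if groups.getD i 0 ≠ groups.getD j 0 ∧
         pvDifferByOne (words.getD i "") (words.getD j "") = true ∧
         s.1 < dp.getD j 0 + 1
      then (dp.getD j 0 + 1, (j : Int)) else s)
    (dp.getD i 0, st.2.1.getD i 0)
  (dp.set i inner.1, st.2.1.set i inner.2,
   if inner.1 > st.2.2 then inner.1 else st.2.2)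

def getLngestSubsequence (words : List String) (groups : List Int) : List String :=
  let n := groups.length
  let st := (List.range n).foldl (pvStepA words groups)
    (List.replicate n 1, List.replicate n (-1), 0)
  match (List.range n).find? (fun i => st.1.getD i 0 == st.2.2) with
  | none => ([] : List String).reverse
  | some i => (pvChaseA st.2.1 words (n+1) (i : Int) []).reverse

-- ===== PORT B =====
-- wildcard key (p, w[:p], w[p+1:]); the slices have nonnegative in-range bounds, so take/drop are exact
def pvKey (w : List Char) (p : Nat) : Nat × List Char × List Char := (p, w.take p, w.drop (p+1))

-- B's reconstruction while-loop ('out = [words[k]] + out; k = parent[k]'); fuel bounds the chain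
def pvChaseB (parent : List Int) (words : List String) : Nat → Int → List String → List String
  | 0, _, out => out
  | fuel+1, k, out =>
    if k = -1 then out
    else pvChaseB parent words fuel (parent.getD k.toNat (-1)) (words.getD k.toNat "" :: out)

-- body of B's 'for i in range(n)' loop; state = (dp, parent, buckets)
def pvStepB (words : List String) (groups : List Int)
    (st : List Int × List Int × PySem.Dict (Nat × List Char × List Char) (List Nat)) (i : Nat) :
    List Int × List Int × PySem.Dict (Nat × List Char × List Char) (List Nat) :=
  let dp := st.1
  let buckets := st.2.2
  let w := (words.getD i "").toList
  let best := (List.range w.length).foldl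
    (fun (b : Int × Int) p =>
      (buckets.getD (pvKey w p) []).foldl
        (fun (b : Int × Int) j =>
          if (words.getD j "").toList.getD p ' ' ≠ w.getD p ' ' ∧
             groups.getD j 0 ≠ groups.getD i 0 then
            if dp.getD j 0 + 1 > b.1 ∨ (dp.getD j 0 + 1 = b.1 ∧ (j : Int) < b.2)
            then (dp.getD j 0 + 1, (j : Int)) else b
          else b) b)
    ((1 : Int), (-1 : Int))
  let buckets' := (List.range w.length).foldl
    (fun bk p => bk.insert (pvKey w p) (bk.getD (pvKey w p) [] ++ [i])) buckets
  (dp.set i best.1, st.2.1.set i best.2, buckets')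

def getLngestSubsequence_alt (words : List String) (groups : List Int) : List String :=
  let n := groups.length
  let st := (List.range n).foldl (pvStepB words groups)
    (List.replicate n 1, List.replicate n (-1), PySem.Dict.empty)
  let dp := st.1
  let maxLen := dp.foldl (fun m v => if v > m then v else m) (0 : Int)
  let k0 : Int := match (List.range n).find? (fun k => dp.getD k 0 == maxLen) with
    | some k => (k : Int)
    | none => -1
  pvChaseB st.2.1 words (n+1) k0 []

-- ===== PRECONDITION & SPEC =====
-- Pre_ excludes the inputs with len(groups) > len(words): there A raises IndexError on words[i]
-- unless short-circuiting happens to skip every out-of-range access, while B (which reads words[i]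
-- unconditionally) raises IndexError.
def Pre_getLngestSubsequence (words : List String) (groups : List Int) : Prop :=
  groups.length ≤ words.length
instance (words : List String) (groups : List Int) : Decidable (Pre_getLngestSubsequence words groups) := by unfold Pre_getLngestSubsequence; infer_instance
def pvWitness_getLngestSubsequence : List String × List Int := (["ab", "bb", "ba"], [1, 2, 2])

def Spec_getLngestSubsequence (words : List String) (groups : List Int) (out : List String) : Prop := out = getLngestSubsequence_alt words groups
instance (words : List String) (groups : List Int) (out : List String) : Decidable (Spec_getLngestSubsequence words groups out) := by unfold Spec_getLngestSubsequence; infer_instance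


-- ===== CLAIM (what is proved, stated in full; the proofs are below) =====
def Claim_equal_getLngestSubsequence : Prop := ∀ (words : List String) (groups : List Int), Dom_getLngestSubsequence words groups → Pre_getLngestSubsequence words groups → Spec_getLngestSubsequence words groups (getLngestSubsequence words groups)

-- ===== proof helpers =====

def pvW (words : List String) (i : Nat) : List Char := (words.getD i "").toList

-- 'the two words agree everywhere except at position p, where they differ'
def pvDiffAt (a b : List Char) (p : Nat) : Prop :=
  p < a.length ∧ p < b.length ∧ a.take p = b.take p ∧ a.drop (p+1) = b.drop (p+1) ∧
    a.getD p ' ' ≠ b.getD p ' '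

-- the 'first max' selection step shared by both inner loops, abstracted over the dp table
def pvLex (dp : List Int) (b : Int × Int) (j : Nat) : Int × Int :=
  if dp.getD j 0 + 1 > b.1 ∨ (dp.getD j 0 + 1 = b.1 ∧ (j : Int) < b.2)
  then (dp.getD j 0 + 1, (j : Int)) else b

theorem pvLex_comm (dp : List Int) (b : Int × Int) (j1 j2 : Nat) :
    pvLex dp (pvLex dp b j1) j2 = pvLex dp (pvLex dp b j2) j1 := by
  unfold pvLex
  rcases b with ⟨b1, b2⟩
  split_ifs <;> simp_all [Prod.ext_iff] <;> omega

theorem pvFoldl_filter_and {α β : Type} (P : α → Prop) [DecidablePred P] (Q : β → α → Prop)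
    [∀ s x, Decidable (Q s x)] (f : β → α → β) :
    ∀ (l : List α) (s : β),
      l.foldl (fun s x => if P x ∧ Q s x then f s x else s) s =
        ((l.filter (fun x => decide (P x))).foldl (fun s x => if Q s x then f s x else s) s) := by
  intro l
  induction l with
  | nil => intro s; rfl
  | cons x l ih =>
    intro s
    by_cases h : P x <;> by_cases h2 : Q s x <;> simp [h, h2, ih]

-- on a strictly increasing candidate list, A's 'strict improvement' scan equals the pvLex scan
theorem pvScanA_eq_lex (dp : List Int) :
    ∀ (l : List Nat) (s : Int × Int), l.Pairwise (· < ·) →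
      (s.2 = -1 ∨ ∀ j ∈ l, s.2 < (j : Int)) →
      l.foldl (fun (s : Int × Int) j =>
          if s.1 < dp.getD j 0 + 1 then (dp.getD j 0 + 1, (j : Int)) else s) s =
        l.foldl (pvLex dp) s := by
  intro l
  induction l with
  | nil => intro s _ _; rfl
  | cons x l ih =>
    intro s hp hs
    have hx : ¬ ((x : Int) < s.2) := by
      rcases hs with h | h
      · omega
      · have := h x (by simp); omega
    have hstep : (if s.1 < dp.getD x 0 + 1 then (dp.getD x 0 + 1, (x : Int)) else s) = pvLex dp s x := by
      unfold pvLex; split_ifs <;> first | rfl | omega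
    rw [List.foldl_cons, List.foldl_cons, hstep]
    apply ih _ (List.Pairwise.of_cons hp)
    by_cases him : s.1 < dp.getD x 0 + 1
    · have hres : pvLex dp s x = (dp.getD x 0 + 1, (x : Int)) := by
        unfold pvLex; split_ifs <;> first | rfl | omega
      rw [hres]
      right; intro j hj
      have hxj : x < j := (List.pairwise_cons.mp hp).1 j hj
      simp; omega
    · have hres : pvLex dp s x = s := by
        unfold pvLex; split_ifs <;> first | rfl | omega
      rw [hres]
      rcases hs with h | h
      · left; exact h
      · right; intro j hj; exact h j (by simp [hj])

theorem pvZipSelf (a : List Char) (c1 c2 : Char) (h : (c1, c2) ∈ a.zip a) : c1 = c2 := by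
  induction a with
  | nil => simp at h
  | cons x a ih =>
    rw [List.zip_cons_cons, List.mem_cons] at h
    rcases h with h | h
    · rw [Prod.mk.injEq] at h
      exact h.1.trans h.2.symm
    · exact ih h

-- mismatch count 1 on equal-length lists = there is exactly one differing position
theorem pvCountP_one_iff : ∀ (a b : List Char), a.length = b.length →
    (((a.zip b).countP (fun c => c.1 != c.2)) = 1 ↔ ∃ p, pvDiffAt a b p) := by
  intro a
  induction a with
  | nil =>
    intro b hb
    simp [pvDiffAt]
  | cons x a ih =>
    intro b hb
    cases b with
    | nil => simp at hb
    | cons y b =>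
      simp only [List.length_cons, Nat.add_right_cancel_iff] at hb
      by_cases hxy : x = y
      · subst hxy
        rw [List.zip_cons_cons, List.countP_cons]
        simp only [bne_self_eq_false, if_neg]
        constructor
        · intro h
          obtain ⟨p, hp⟩ := (ih b hb).mp (by simpa using h)
          exact ⟨p + 1, by
            obtain ⟨h1, h2, h3, h4, h5⟩ := hp
            refine ⟨by simpa using h1, by simpa using h2, ?_, ?_, ?_⟩
            · simpa [List.take_succ_cons] using h3
            · simpa using h4
            · simpa [List.getD_cons_succ] using h5⟩
        · rintro ⟨p, hp⟩
          obtain ⟨h1, h2, h3, h4, h5⟩ := hp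
          cases p with
          | zero => simp [List.getD_cons_zero] at h5
          | succ p =>
            apply (fun h => by simpa using h) ∘ (ih b hb).mpr
            exact ⟨p, by simpa using h1, by simpa using h2,
              by simpa [List.take_succ_cons] using h3, by simpa using h4,
              by simpa [List.getD_cons_succ] using h5⟩
      · rw [List.zip_cons_cons, List.countP_cons]
        simp only [if_pos (by simpa using hxy : (x != y) = true)]
        constructor
        · intro h
          have h0 : (a.zip b).countP (fun c => c.1 != c.2) = 0 := by omega
          have hab : a = b := by
            apply List.ext_getElem hb
            intro i hi hbi
            by_contra hne
            have hmem : (a[i], b[i]) ∈ a.zip b := by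
              have : (a.zip b)[i]'(by simp [List.length_zip]; omega) = (a[i], b[i]) := by
                simp [List.getElem_zip]
              exact this ▸ List.getElem_mem _
            have := List.countP_eq_zero.mp h0 _ hmem
            simp at this
            exact hne this
          refine ⟨0, by simp, by simp, rfl, by simpa using hab, by simpa using hxy⟩
        · rintro ⟨p, h1, h2, h3, h4, h5⟩
          cases p with
          | zero =>
            simp only [List.drop_succ_cons, List.drop_zero] at h4
            subst h4
            have hz : List.countP (fun c => c.1 != c.2) (a.zip a) = 0 := by
              rw [List.countP_eq_zero]
              intro c hc
              obtain ⟨c1, c2⟩ := c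
              simp [pvZipSelf a c1 c2 hc]
            omega
          | succ p =>
            exfalso
            apply hxy
            have := congrArg (fun l => l.getD 0 ' ') h3
            simpa [List.take_succ_cons] using this

theorem pvDiffAt_length {a b : List Char} {p : Nat} (h : pvDiffAt a b p) : a.length = b.length := by
  obtain ⟨h1, h2, _, h4, _⟩ := h
  have := congrArg List.length h4
  rw [List.length_drop, List.length_drop] at this
  omega

theorem pvDifferByOne_iff (w1 w2 : String) :
    pvDifferByOne w1 w2 = true ↔ ∃ p, pvDiffAt w1.toList w2.toList p := by
  unfold pvDifferByOne
  by_cases hlen : w1.toList.length = w2.toList.length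
  · rw [if_neg (by omega)]
    have hf : (fun (d : Int) (c : Char × Char) => if c.1 ≠ c.2 then d + 1 else d) =
        (fun (d : Int) (c : Char × Char) => if (c.1 != c.2) = true then d + 1 else d) := by
      funext d c
      by_cases h : c.1 = c.2 <;> simp [h]
    rw [hf, PySem.List.foldl_count_if, beq_iff_eq]
    rw [← pvCountP_one_iff _ _ hlen]
    omega
  · rw [if_pos (by omega)]
    constructor
    · intro h
      simp at h
    · rintro ⟨p, hp⟩
      exact absurd (pvDiffAt_length hp) hlen

-- contents of the bucket dict after processing indices 0..i-1
def pvBucketSpec (words : List String) (i : Nat) (k : Nat × List Char × List Char) : List Nat :=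
  (List.range i).filter
    (fun j => decide (k.1 < (pvW words j).length ∧ pvKey (pvW words j) k.1 = k))

def pvBInv (words : List String) (i : Nat)
    (bk : PySem.Dict (Nat × List Char × List Char) (List Nat)) : Prop :=
  ∀ k, bk.getD k [] = pvBucketSpec words i k

theorem pvInsFold (w : List Char) (i : Nat) :
    ∀ (ps : List Nat), ps.Nodup → ∀ (bk : PySem.Dict (Nat × List Char × List Char) (List Nat))
      (k : Nat × List Char × List Char),
      (ps.foldl (fun bk p => bk.insert (pvKey w p) (bk.getD (pvKey w p) [] ++ [i])) bk).getD k [] =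
        if k.1 ∈ ps ∧ pvKey w k.1 = k then bk.getD k [] ++ [i] else bk.getD k [] := by
  intro ps
  induction ps with
  | nil => intro _ bk k; simp
  | cons p ps ih =>
    intro hnd bk k
    rw [List.foldl_cons, ih (List.Nodup.of_cons hnd)]
    have hins : ∀ k', (bk.insert (pvKey w p) (bk.getD (pvKey w p) [] ++ [i])).getD k' [] =
        if k' = pvKey w p then bk.getD (pvKey w p) [] ++ [i] else bk.getD k' [] :=
      fun k' => PySem.Dict.getD_insert bk (pvKey w p) k' _ _
    by_cases hk : pvKey w k.1 = k
    · by_cases hkp : k.1 = p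
      · have hkey : k = pvKey w p := by rw [← hk, hkp]
        have hpn : p ∉ ps := (List.nodup_cons.mp hnd).1
        rw [if_neg (by rw [hkp]; exact fun h => hpn h.1)]
        rw [hins, if_pos hkey, if_pos ⟨by simp [hkp], hk⟩, hkey]
      · have hne : k ≠ pvKey w p := by
          intro h
          apply hkp
          rw [h]
          simp [pvKey]
        have hmemiff : (k.1 ∈ p :: ps) ↔ (k.1 ∈ ps) := by
          simp [List.mem_cons, hkp]
        rw [hins, if_neg hne]
        by_cases hmem : k.1 ∈ ps
        · rw [if_pos ⟨hmem, hk⟩, if_pos ⟨hmemiff.mpr hmem, hk⟩]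
        · rw [if_neg (fun h => hmem h.1), if_neg (fun h => hmem (hmemiff.mp h.1))]
    · have hne : k ≠ pvKey w p := by
        intro h
        apply hk
        rw [h]
        simp [pvKey]
      rw [if_neg (fun h => hk h.2), hins, if_neg hne, if_neg (fun h => hk h.2)]

theorem pvBInv_step (words : List String) (i : Nat)
    (bk : PySem.Dict (Nat × List Char × List Char) (List Nat)) (h : pvBInv words i bk) :
    pvBInv words (i+1)
      ((List.range (pvW words i).length).foldl
        (fun bk p => bk.insert (pvKey (pvW words i) p) (bk.getD (pvKey (pvW words i) p) [] ++ [i])) bk) := by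
  intro k
  rw [pvInsFold _ i _ List.nodup_range, h k]
  unfold pvBucketSpec
  rw [List.range_succ, List.filter_append]
  by_cases hc : k.1 < (pvW words i).length ∧ pvKey (pvW words i) k.1 = k
  · rw [if_pos ⟨List.mem_range.mpr hc.1, hc.2⟩]
    simp [hc]
  · rw [if_neg (by rw [List.mem_range]; exact hc)]
    simp [hc]

-- Prop-test variant of pvFoldl_filter
theorem pvFoldl_filter_prop {α β : Type} (P : α → Prop) [DecidablePred P] (f : β → α → β) :
    ∀ (l : List α) (s : β),
      l.foldl (fun s x => if P x then f s x else s) s =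
        (l.filter (fun x => decide (P x))).foldl f s := by
  intro l
  induction l with
  | nil => intro s; rfl
  | cons x l ih =>
    intro s
    by_cases h : P x <;> simp [h, ih]

theorem pvGetD_drop (l : List Char) (m t : Nat) :
    (l.drop m).getD t ' ' = l.getD (m + t) ' ' := by
  rw [List.getD_eq_getElem?_getD, List.getD_eq_getElem?_getD, List.getElem?_drop]

-- two distinct single-difference positions are impossible
theorem pvDiffAt_unique {a b : List Char} {p q : Nat} (hp : pvDiffAt a b p) (hq : pvDiffAt a b q) :
    p = q := by
  by_contra hne
  rcases Nat.lt_or_ge p q with h | h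
  · obtain ⟨_, _, _, hd, _⟩ := hp
    obtain ⟨_, _, _, _, hg⟩ := hq
    apply hg
    have := congrArg (fun l => l.getD (q - (p+1)) ' ') hd
    simpa [pvGetD_drop, Nat.add_sub_cancel' h] using this
  · rcases Nat.lt_or_ge q p with h2 | h2
    · obtain ⟨_, _, _, hd, _⟩ := hq
      obtain ⟨_, _, _, _, hg⟩ := hp
      apply hg
      have := congrArg (fun l => l.getD (p - (q+1)) ' ') hd
      simpa [pvGetD_drop, Nat.add_sub_cancel' h2] using this
    · omega

-- the candidate lists of the two inner loops
def pvLA (words : List String) (groups : List Int) (i : Nat) : List Nat :=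
  (List.range i).filter (fun j => decide (groups.getD i 0 ≠ groups.getD j 0 ∧
    pvDifferByOne (words.getD i "") (words.getD j "") = true))

def pvPiece (words : List String) (groups : List Int) (i p : Nat) : List Nat :=
  (pvBucketSpec words i (pvKey (pvW words i) p)).filter
    (fun j => decide ((words.getD j "").toList.getD p ' ' ≠ (pvW words i).getD p ' ' ∧
      groups.getD j 0 ≠ groups.getD i 0))

def pvLB (words : List String) (groups : List Int) (i : Nat) : List Nat :=
  (List.range (pvW words i).length).flatMap (pvPiece words groups i)

theorem pvMemPiece (words : List String) (groups : List Int) (i p j : Nat)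
    (hp : p < (pvW words i).length) :
    j ∈ pvPiece words groups i p ↔
      (j < i ∧ pvDiffAt (pvW words i) (pvW words j) p ∧ groups.getD i 0 ≠ groups.getD j 0) := by
  unfold pvPiece pvBucketSpec
  rw [List.mem_filter, List.mem_filter, List.mem_range]
  simp only [decide_eq_true_eq, pvKey, Prod.mk.injEq, pvDiffAt, true_and, and_true,
    eq_self_iff_true]
  constructor
  · rintro ⟨⟨hji, hlen, htake, hdrop⟩, hchar, hg⟩
    exact ⟨hji, ⟨hp, hlen, htake.symm, hdrop.symm, Ne.symm hchar⟩, Ne.symm hg⟩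
  · rintro ⟨hji, ⟨hpi, hlen, htake, hdrop, hchar⟩, hg⟩
    exact ⟨⟨hji, hlen, htake.symm, hdrop.symm⟩, Ne.symm hchar, Ne.symm hg⟩

theorem pvMem_LB_iff (words : List String) (groups : List Int) (i j : Nat) :
    j ∈ pvLB words groups i ↔ j ∈ pvLA words groups i := by
  unfold pvLB pvLA
  rw [List.mem_flatMap, List.mem_filter, List.mem_range]
  simp only [decide_eq_true_eq]
  constructor
  · rintro ⟨p, hp, hmem⟩
    rw [List.mem_range] at hp
    obtain ⟨hji, hd, hg⟩ := (pvMemPiece words groups i p j hp).mp hmem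
    exact ⟨hji, hg, (pvDifferByOne_iff _ _).mpr ⟨p, hd⟩⟩
  · rintro ⟨hji, hg, hd⟩
    obtain ⟨p, hp⟩ := (pvDifferByOne_iff _ _).mp hd
    refine ⟨p, List.mem_range.mpr hp.1, (pvMemPiece words groups i p j hp.1).mpr ⟨hji, hp, hg⟩⟩

theorem pvNodup_LB (words : List String) (groups : List Int) (i : Nat) :
    (pvLB words groups i).Nodup := by
  unfold pvLB
  rw [List.nodup_flatMap]
  constructor
  · intro p _
    exact List.Nodup.filter _ (List.Nodup.filter _ List.nodup_range)
  · apply List.Pairwise.imp_of_mem ?_ List.pairwise_lt_range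
    intro p q hpmem hqmem hpq
    intro j hjp hjq
    rw [List.mem_range] at hpmem hqmem
    obtain ⟨_, hdp, _⟩ := (pvMemPiece words groups i p j hpmem).mp hjp
    obtain ⟨_, hdq, _⟩ := (pvMemPiece words groups i q j hqmem).mp hjq
    exact absurd (pvDiffAt_unique hdp hdq) (Nat.ne_of_lt hpq)

theorem pvPerm_LB_LA (words : List String) (groups : List Int) (i : Nat) :
    (pvLB words groups i).Perm (pvLA words groups i) := by
  have hnd : (pvLA words groups i).Nodup := by
    unfold pvLA
    exact List.Nodup.filter _ List.nodup_range
  rw [List.perm_ext_iff_of_nodup (pvNodup_LB words groups i) hnd]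
  intro j
  exact pvMem_LB_iff words groups i j

-- the two inner loops compute the same (dp value, parent) pair
theorem pvInner_eq (words : List String) (groups : List Int) (dp : List Int) (i : Nat)
    (bk : PySem.Dict (Nat × List Char × List Char) (List Nat)) (hbk : pvBInv words i bk) :
    (List.range i).foldl
      (fun (s : Int × Int) j =>
        if groups.getD i 0 ≠ groups.getD j 0 ∧
           pvDifferByOne (words.getD i "") (words.getD j "") = true ∧
           s.1 < dp.getD j 0 + 1
        then (dp.getD j 0 + 1, (j : Int)) else s) ((1 : Int), (-1 : Int)) =
    (List.range ((words.getD i "").toList).length).foldl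
      (fun (b : Int × Int) p =>
        (bk.getD (pvKey ((words.getD i "").toList) p) []).foldl
          (fun (b : Int × Int) j =>
            if (words.getD j "").toList.getD p ' ' ≠ ((words.getD i "").toList).getD p ' ' ∧
               groups.getD j 0 ≠ groups.getD i 0 then
              if dp.getD j 0 + 1 > b.1 ∨ (dp.getD j 0 + 1 = b.1 ∧ (j : Int) < b.2)
              then (dp.getD j 0 + 1, (j : Int)) else b
            else b) b) ((1 : Int), (-1 : Int)) := by
  -- LHS: filter out the validity test, then turn the strict-improvement scan into pvLex
  have hA : (List.range i).foldl
      (fun (s : Int × Int) j =>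
        if groups.getD i 0 ≠ groups.getD j 0 ∧
           pvDifferByOne (words.getD i "") (words.getD j "") = true ∧
           s.1 < dp.getD j 0 + 1
        then (dp.getD j 0 + 1, (j : Int)) else s) ((1 : Int), (-1 : Int)) =
      (pvLA words groups i).foldl (pvLex dp) ((1 : Int), (-1 : Int)) := by
    have hfun : (fun (s : Int × Int) j =>
        if groups.getD i 0 ≠ groups.getD j 0 ∧
           pvDifferByOne (words.getD i "") (words.getD j "") = true ∧
           s.1 < dp.getD j 0 + 1
        then (dp.getD j 0 + 1, (j : Int)) else s) =
        (fun (s : Int × Int) j =>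
          if (groups.getD i 0 ≠ groups.getD j 0 ∧
              pvDifferByOne (words.getD i "") (words.getD j "") = true) ∧
             s.1 < dp.getD j 0 + 1
          then (dp.getD j 0 + 1, (j : Int)) else s) := by
      funext s j
      exact if_congr (Iff.symm and_assoc) rfl rfl
    rw [hfun, pvFoldl_filter_and]
    apply pvScanA_eq_lex
    · exact List.Pairwise.filter _ List.pairwise_lt_range
    · left; rfl
  -- RHS: the nested loop is the pvLex fold over pvLB
  have hB : (List.range ((words.getD i "").toList).length).foldl
      (fun (b : Int × Int) p =>
        (bk.getD (pvKey ((words.getD i "").toList) p) []).foldl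
          (fun (b : Int × Int) j =>
            if (words.getD j "").toList.getD p ' ' ≠ ((words.getD i "").toList).getD p ' ' ∧
               groups.getD j 0 ≠ groups.getD i 0 then
              if dp.getD j 0 + 1 > b.1 ∨ (dp.getD j 0 + 1 = b.1 ∧ (j : Int) < b.2)
              then (dp.getD j 0 + 1, (j : Int)) else b
            else b) b) ((1 : Int), (-1 : Int)) =
      (pvLB words groups i).foldl (pvLex dp) ((1 : Int), (-1 : Int)) := by
    unfold pvLB
    rw [List.foldl_flatMap]
    congr 1
    funext b p
    rw [hbk (pvKey ((words.getD i "").toList) p)]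
    exact pvFoldl_filter_prop
      (fun j => (words.getD j "").toList.getD p ' ' ≠ ((words.getD i "").toList).getD p ' ' ∧
        groups.getD j 0 ≠ groups.getD i 0)
      (pvLex dp) _ b
  rw [hA, hB]
  exact (List.Perm.foldl_eq' (pvPerm_LB_LA words groups i)
    (fun x _ y _ z => pvLex_comm dp z x y) _).symm

theorem pvTakeSetSucc (l : List Int) (i : Nat) (v : Int) (h : i < l.length) :
    (l.set i v).take (i+1) = l.take i ++ [v] := by
  rw [List.set_eq_take_append_cons_drop, if_pos h, List.take_append]
  have h1 : (List.take i l).length = i := by simp; omega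
  rw [List.take_take, Nat.min_eq_right (by omega), h1]
  simp

-- the joint invariant carried through the two main loops
def pvInv (words : List String) (groups : List Int) (n i : Nat)
    (stA : List Int × List Int × Int)
    (stB : List Int × List Int × PySem.Dict (Nat × List Char × List Char) (List Nat)) : Prop :=
  stA.1 = stB.1 ∧ stA.2.1 = stB.2.1 ∧ stA.1.length = n ∧ stA.2.1.length = n ∧
  (∀ j, i ≤ j → j < n → stA.1.getD j 0 = 1 ∧ stA.2.1.getD j 0 = -1) ∧
  stA.2.2 = (stA.1.take i).foldl (fun m v => if v > m then v else m) 0 ∧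
  pvBInv words i stB.2.2

theorem pvInv_step (words : List String) (groups : List Int) (n i : Nat) (hi : i < n)
    (stA : List Int × List Int × Int)
    (stB : List Int × List Int × PySem.Dict (Nat × List Char × List Char) (List Nat))
    (h : pvInv words groups n i stA stB) :
    pvInv words groups n (i+1) (pvStepA words groups stA i) (pvStepB words groups stB i) := by
  obtain ⟨hdp, hpar, hld, hlp, hun, hml, hbk⟩ := h
  have hstart : (stA.1.getD i 0, stA.2.1.getD i 0) = ((1 : Int), (-1 : Int)) := by
    obtain ⟨h1, h2⟩ := hun i le_rfl hi
    rw [h1, h2]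
  have hinner :
      (List.range i).foldl
        (fun (s : Int × Int) j =>
          if groups.getD i 0 ≠ groups.getD j 0 ∧
             pvDifferByOne (words.getD i "") (words.getD j "") = true ∧
             s.1 < stA.1.getD j 0 + 1
          then (stA.1.getD j 0 + 1, (j : Int)) else s) (stA.1.getD i 0, stA.2.1.getD i 0) =
      (List.range ((words.getD i "").toList).length).foldl
        (fun (b : Int × Int) p =>
          (stB.2.2.getD (pvKey ((words.getD i "").toList) p) []).foldl
            (fun (b : Int × Int) j =>
              if (words.getD j "").toList.getD p ' ' ≠ ((words.getD i "").toList).getD p ' ' ∧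
                 groups.getD j 0 ≠ groups.getD i 0 then
                if stA.1.getD j 0 + 1 > b.1 ∨ (stA.1.getD j 0 + 1 = b.1 ∧ (j : Int) < b.2)
                then (stA.1.getD j 0 + 1, (j : Int)) else b
              else b) b) ((1 : Int), (-1 : Int)) := by
    rw [hstart]
    exact pvInner_eq words groups stA.1 i stB.2.2 hbk
  unfold pvStepA pvStepB
  simp only []
  rw [← hdp, ← hpar, ← hinner]
  set v := ((List.range i).foldl
        (fun (s : Int × Int) j =>
          if groups.getD i 0 ≠ groups.getD j 0 ∧
             pvDifferByOne (words.getD i "") (words.getD j "") = true ∧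
             s.1 < stA.1.getD j 0 + 1
          then (stA.1.getD j 0 + 1, (j : Int)) else s) (stA.1.getD i 0, stA.2.1.getD i 0)) with hv
  refine ⟨rfl, rfl, by simp [hld], by simp [hlp], ?_, ?_, ?_⟩
  · intro j hj1 hj2
    have hne : i ≠ j := by omega
    obtain ⟨h1, h2⟩ := hun j (by omega) hj2
    constructor
    · rw [List.getD_eq_getElem?_getD, List.getElem?_set, if_neg hne,
        ← List.getD_eq_getElem?_getD]
      exact h1
    · rw [List.getD_eq_getElem?_getD, List.getElem?_set, if_neg hne,
        ← List.getD_eq_getElem?_getD]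
      exact h2
  · rw [pvTakeSetSucc _ _ _ (by omega), List.foldl_append, ← hml]
    rfl
  · exact pvBInv_step words i stB.2.2 hbk

theorem pvInv_main (words : List String) (groups : List Int) (n : Nat) :
    ∀ i, i ≤ n →
      pvInv words groups n i
        ((List.range i).foldl (pvStepA words groups) (List.replicate n 1, List.replicate n (-1), 0))
        ((List.range i).foldl (pvStepB words groups)
          (List.replicate n 1, List.replicate n (-1), PySem.Dict.empty)) := by
  intro i
  induction i with
  | zero =>
    intro _
    simp only [List.range_zero, List.foldl_nil]
    refine ⟨rfl, rfl, by simp, by simp, ?_, rfl, ?_⟩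
    · intro j _ hj
      constructor <;> rw [List.getD_eq_getElem?_getD] <;> simp [hj]
    · intro k
      rw [PySem.Dict.getD_empty]
      rfl
  | succ i ih =>
    intro hi
    rw [List.range_succ, List.foldl_append, List.foldl_append]
    simp only [List.foldl_cons, List.foldl_nil]
    exact pvInv_step words groups n i (by omega) _ _ (ih (by omega))

theorem pvChase_rev (parent : List Int) (words : List String) :
    ∀ (fuel : Nat) (i : Int) (res : List String),
      (pvChaseA parent words fuel i res).reverse = pvChaseB parent words fuel i res.reverse := by
  intro fuel
  induction fuel with
  | zero => intro i res; rfl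
  | succ fuel ih =>
    intro i res
    unfold pvChaseA pvChaseB
    by_cases h : i = -1
    · simp [h]
    · rw [if_neg h, if_neg h, ih]
      simp

theorem pvMain_eq (words : List String) (groups : List Int) :
    getLngestSubsequence words groups = getLngestSubsequence_alt words groups := by
  obtain ⟨hdp, hpar, hld, _, _, hml, _⟩ :=
    pvInv_main words groups groups.length groups.length le_rfl
  set n := groups.length with hn
  set stA := (List.range n).foldl (pvStepA words groups)
    (List.replicate n 1, List.replicate n (-1), 0) with hstA
  set stB := (List.range n).foldl (pvStepB words groups)
    (List.replicate n 1, List.replicate n (-1), PySem.Dict.empty) with hstB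
  have hmax : stA.2.2 = stB.1.foldl (fun m v => if v > m then v else m) 0 := by
    rw [hml, ← hdp]
    congr 1
    rw [← hld, List.take_length]
  show (match (List.range n).find? (fun i => stA.1.getD i 0 == stA.2.2) with
    | none => ([] : List String).reverse
    | some i => (pvChaseA stA.2.1 words (n+1) (i : Int) []).reverse) =
    pvChaseB stB.2.1 words (n+1)
      (match (List.range n).find? (fun k => stB.1.getD k 0 == stB.1.foldl (fun m v => if v > m then v else m) 0) with
        | some k => (k : Int)
        | none => -1) []
  rw [← hmax, ← hdp, ← hpar]
  cases hfind : (List.range n).find? (fun i => stA.1.getD i 0 == stA.2.2) with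
  | none =>
    simp only [List.reverse_nil]
    rfl
  | some i =>
    show (pvChaseA stA.2.1 words (n+1) (i : Int) []).reverse =
      pvChaseB stA.2.1 words (n+1) (i : Int) []
    exact pvChase_rev stA.2.1 words (n+1) (i : Int) []

-- ===== VERDICT (by name: the statement is the Claim_ definition above) =====
theorem getLngestSubsequence_spec : Claim_equal_getLngestSubsequence := by
  intro words groups _ _
  unfold Spec_getLngestSubsequence
  exact pvMain_eq words groups
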